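-- pv_equiv track=rewrite | github.com/MaX-Lo/ProjectEuler | 203_squarefree_binomial_coefficients.py | distinct_num_in_pascal_triangle
-- ===== SOURCE A (Python) =====
-- import copy
--
-- def distinct_num_in_pascal_triangle(num_of_rows):
--     nums = set()
--     nums.add(1)
--     last_row = [1]
--     for i in range(1, num_of_rows):
--         row = [1]
--         for j in range(len(last_row)-1):
--             row.append(last_row[j] + last_row[j+1])
--             nums.add(last_row[j] + last_row[j+1])
--         row.append(1)
--         last_row = copy.deepcopy(row)
--     return nums
-- ===== SOURCE B (Python) =====
-- import math
--
-- def distinct_num_in_pascal_triangle(num_of_rows):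
--     nums = {1}
--     for i in range(num_of_rows):
--         for j in range(i + 1):
--             nums.add(math.comb(i, j))
--     return nums
-- ===== Notes on version B (the rewrite author's own statement) =====
-- stated objective: idiomatic
-- what changed: B evaluates each binomial coefficient directly with math.comb over a plain double range instead of maintaining the previous Pascal row and summing adjacent entries.
import Mathlib
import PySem

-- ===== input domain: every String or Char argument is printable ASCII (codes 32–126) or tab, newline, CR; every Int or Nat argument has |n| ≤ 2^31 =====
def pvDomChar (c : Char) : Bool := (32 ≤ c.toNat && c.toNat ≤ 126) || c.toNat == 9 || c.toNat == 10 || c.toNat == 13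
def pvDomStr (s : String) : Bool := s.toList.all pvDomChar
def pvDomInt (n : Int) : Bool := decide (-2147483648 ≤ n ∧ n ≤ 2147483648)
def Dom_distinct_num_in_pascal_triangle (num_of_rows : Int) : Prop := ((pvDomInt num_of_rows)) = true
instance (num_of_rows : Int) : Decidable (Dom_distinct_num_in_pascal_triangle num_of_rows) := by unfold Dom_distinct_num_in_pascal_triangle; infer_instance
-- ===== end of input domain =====

-- B replaces A's row-by-row additive Pascal recurrence by direct evaluation of each
-- binomial coefficient (math.comb) over a plain double range; same distinct values.

-- ===== PORT A =====
-- one outer iteration of A: build the next row from last_row (= st.2), adding each interior sum to nums (= st.1)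
def pvStepA (st : PySem.Set Int × List Int) (_i : Int) : PySem.Set Int × List Int :=
  let last_row := st.2
  let r := (PySem.List.pyRange 0 ((last_row.length : Int) - 1) 1).foldl
    (fun (st2 : List Int × PySem.Set Int) j =>
      (st2.1 ++ [PySem.List.pyGetD last_row j 0 + PySem.List.pyGetD last_row (j+1) 0],
       PySem.Set.add st2.2 (PySem.List.pyGetD last_row j 0 + PySem.List.pyGetD last_row (j+1) 0)))
    ([1], st.1)
  (r.2, r.1 ++ [1])

def distinct_num_in_pascal_triangle (num_of_rows : Int) : List Int :=
  ((PySem.List.pyRange 1 num_of_rows 1).foldl pvStepA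
    (PySem.Set.add PySem.Set.empty 1, [1])).1

-- ===== PORT B =====
-- one outer iteration of B: add math.comb(i, j) for j in range(i+1)
def pvStepB (nums : PySem.Set Int) (i : Int) : PySem.Set Int :=
  (PySem.List.pyRange 0 (i+1) 1).foldl
    (fun s j => PySem.Set.add s ((i.toNat.choose j.toNat : Nat) : Int)) nums

def distinct_num_in_pascal_triangle_alt (num_of_rows : Int) : List Int :=
  (PySem.List.pyRange 0 num_of_rows 1).foldl pvStepB (PySem.Set.add PySem.Set.empty 1)

-- ===== PRECONDITION & SPEC =====
def Spec_distinct_num_in_pascal_triangle (num_of_rows : Int) (out : List Int) : Prop := out = distinct_num_in_pascal_triangle_alt num_of_rows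
instance (num_of_rows : Int) (out : List Int) : Decidable (Spec_distinct_num_in_pascal_triangle num_of_rows out) := by unfold Spec_distinct_num_in_pascal_triangle; infer_instance

-- ===== CLAIM (what is proved, stated in full; the proofs are below) =====
def Claim_equal_distinct_num_in_pascal_triangle : Prop := ∀ (num_of_rows : Int), Dom_distinct_num_in_pascal_triangle num_of_rows → Spec_distinct_num_in_pascal_triangle num_of_rows (distinct_num_in_pascal_triangle num_of_rows)

-- ===== LEMMAS AND PROOFS =====

-- row i of Pascal's triangle as binomial coefficients
def binRow (i : Nat) : List Int := (List.range (i+1)).map (fun j => ((i.choose j : Nat) : Int))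

theorem binRow_zero : binRow 0 = [1] := by decide

theorem length_binRow (k : Nat) : (binRow k).length = k + 1 := by
  simp [binRow]

-- membership in a set is preserved by a fold of adds
theorem mem_foldl_add {B : Type} {l : List B} (f : B → Int) (s : PySem.Set Int) (x : Int)
    (h : x ∈ s) : x ∈ l.foldl (fun s j => PySem.Set.add s (f j)) s := by
  induction l generalizing s with
  | nil => exact h
  | cons a t ih => exact ih _ ((PySem.Set.mem_add _ _ _).mpr (Or.inl h))

theorem mem_foldl_stepB {l : List Int} (s : PySem.Set Int) (x : Int)
    (h : x ∈ s) : x ∈ l.foldl pvStepB s := by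
  induction l generalizing s with
  | nil => exact h
  | cons a t ih =>
      exact ih _ (mem_foldl_add _ _ _ h)

theorem foldl_congr' {A B : Type} {l : List B} {f g : A -> B -> A}
    (h : forall x, x ∈ l -> forall acc, f acc x = g acc x) (init : A) :
    l.foldl f init = l.foldl g init := by
  induction l generalizing init with
  | nil => rfl
  | cons a t ih =>
      simp only [List.foldl_cons]
      rw [h a (by simp)]
      exact ih (fun x hx acc => h x (by simp [hx]) acc) _

theorem pyGetD_binRow (k j : Nat) (hj : j < k + 1) :
    PySem.List.pyGetD (binRow k) ((j : Nat) : Int) 0 = ((k.choose j : Nat) : Int) := by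
  rw [PySem.List.pyGetD_natCast, List.getD_eq_getElem _ _ (by simpa [length_binRow] using hj)]
  simp [binRow]

-- A's one step on the binomial row equals B's one step, given 1 is already present
theorem stepA_binRow (k : Nat) (T : PySem.Set Int) (h : (1:Int) ∈ T) (a : Int) :
    pvStepA (T, binRow k) a = (pvStepB T ((k : Int) + 1), binRow (k+1)) := by
  have hlen : ((binRow k).length : Int) - 1 = (k : Int) := by
    simp [length_binRow]
  -- Pascal's rule: the value added at interior position j of A's loop
  have hv : forall j, j ∈ PySem.List.pyRange 0 (k : Int) 1 ->
      PySem.List.pyGetD (binRow k) j 0 + PySem.List.pyGetD (binRow k) (j+1) 0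
        = (((k+1).choose (j.toNat + 1) : Nat) : Int) := by
    intro j hj
    rw [PySem.List.mem_pyRange_one] at hj
    obtain ⟨h0, hk2⟩ := hj
    obtain ⟨jn, rfl⟩ := Int.eq_ofNat_of_zero_le h0
    have hjk : jn < k := by exact_mod_cast hk2
    have e1 : ((jn : Nat) : Int) + 1 = ((jn+1 : Nat) : Int) := by push_cast; ring
    rw [e1, pyGetD_binRow k jn (by omega), pyGetD_binRow k (jn+1) (by omega)]
    have e2 : (((jn : Nat) : Int)).toNat = jn := by simp
    rw [e2]
    exact_mod_cast (Nat.choose_succ_succ k jn).symm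
  have hzero : PySem.List.pyRange 0 ((k : Nat) : Int) 1 = (List.range k).map (fun j : Nat => ((j : Nat) : Int)) :=
    PySem.List.pyRange_zero_nat k
  unfold pvStepA
  simp only [hlen]
  rw [PySem.List.foldl_prod_mk
      (f := fun (acc : List Int) j => acc ++ [PySem.List.pyGetD (binRow k) j 0 + PySem.List.pyGetD (binRow k) (j+1) 0])
      (g := fun (acc : PySem.Set Int) j => PySem.Set.add acc (PySem.List.pyGetD (binRow k) j 0 + PySem.List.pyGetD (binRow k) (j+1) 0))]
  refine Prod.ext ?_ ?_
  · -- nums component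
    show ((PySem.List.pyRange 0 (k:Int) 1).foldl
        (fun acc j => PySem.Set.add acc (PySem.List.pyGetD (binRow k) j 0 + PySem.List.pyGetD (binRow k) (j+1) 0)) T)
        = pvStepB T ((k : Int) + 1)
    rw [foldl_congr' (g := fun (acc : PySem.Set Int) (j : Int) =>
          PySem.Set.add acc ((((k+1).choose (j.toNat + 1) : Nat)) : Int))
        (fun x hx acc => by rw [hv x hx]) T]
    -- B's side: range 0 (k+2); the first and last adds (both of value 1) are no-ops
    unfold pvStepB
    have htn : ((k : Int) + 1).toNat = k + 1 := by omega
    have hsplit : PySem.List.pyRange 0 ((k:Int) + 1 + 1) 1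
        = 0 :: (PySem.List.pyRange 1 ((k:Int) + 1) 1 ++ [(k:Int) + 1]) := by
      rw [PySem.List.pyRange_one_cons (by omega), PySem.List.pyRange_one_succ_right (by omega)]
      norm_num
    rw [hsplit]
    simp only [List.foldl_cons, List.foldl_append, List.foldl_nil, htn]
    have hfirst : PySem.Set.add T (((k+1).choose ((0:Int).toNat) : Nat) : Int) = T := by
      simpa using PySem.Set.add_of_mem h
    rw [hfirst]
    have hshift : PySem.List.pyRange 1 ((k:Int)+1) 1 = (List.range k).map (fun j : Nat => (1:Int) + (j : Int)) := by
      rw [PySem.List.pyRange_one, show (((k:Int)+1) - 1).toNat = k by omega]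
    rw [hshift, hzero, List.foldl_map, List.foldl_map]
    rw [foldl_congr' (f := fun (acc : PySem.Set Int) (j : Nat) =>
          PySem.Set.add acc ((((k+1).choose (((j:Int)).toNat + 1) : Nat)) : Int))
        (g := fun (acc : PySem.Set Int) (j : Nat) =>
          PySem.Set.add acc ((((k+1).choose (((1:Int) + (j:Int)).toNat) : Nat)) : Int))
        (fun x hx acc => by
          show PySem.Set.add acc ((((k+1).choose (((x:Int)).toNat + 1) : Nat)) : Int)
              = PySem.Set.add acc ((((k+1).choose (((1:Int) + (x:Int)).toNat) : Nat)) : Int)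
          rw [show ((x:Int)).toNat + 1 = ((1:Int) + (x:Int)).toNat by omega]) T]
    have hone : (1:Int) ∈ (List.range k).foldl
        (fun (acc : PySem.Set Int) (j : Nat) =>
          PySem.Set.add acc ((((k+1).choose (((1:Int) + (j:Int)).toNat) : Nat)) : Int)) T :=
      mem_foldl_add (l := List.range k)
        (fun j => ((((k+1).choose (((1:Int) + (j:Int)).toNat) : Nat)) : Int)) T 1 h
    rw [show ((((k+1).choose (k+1) : Nat)) : Int) = 1 by simp]
    exact (PySem.Set.add_of_mem hone).symm
  · -- row component
    show ((PySem.List.pyRange 0 (k:Int) 1).foldl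
        (fun (acc : List Int) j => acc ++ [PySem.List.pyGetD (binRow k) j 0 + PySem.List.pyGetD (binRow k) (j+1) 0]) [1]) ++ [1]
        = binRow (k+1)
    rw [PySem.List.foldl_append_singleton_eq_map, List.map_congr_left hv, hzero, List.map_map]
    have hbr : binRow (k+1) = [1] ++ (List.range k).map (fun j => (((k+1).choose (j+1) : Nat) : Int)) ++ [1] := by
      unfold binRow
      rw [List.range_succ, List.range_succ_eq_map]
      simp [List.map_map, Function.comp_def, Nat.succ_eq_add_one]
    rw [hbr]
    congr 2

-- main invariant: after processing rows up to k, A's state matches B's set with the binomial row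
theorem core (k : Nat) (s : PySem.Set Int) (h : (1:Int) ∈ s) :
    (PySem.List.pyRange 1 ((k:Int)+1) 1).foldl pvStepA (s, binRow 0)
      = ((PySem.List.pyRange 0 ((k:Int)+1) 1).foldl pvStepB s, binRow k) := by
  induction k with
  | zero =>
      rw [PySem.List.pyRange_one_eq_nil (by omega)]
      rw [PySem.List.pyRange_one_cons (by omega), PySem.List.pyRange_one_eq_nil (by omega)]
      simp only [List.foldl_nil, List.foldl_cons]
      unfold pvStepB
      rw [PySem.List.pyRange_one_cons (by omega), PySem.List.pyRange_one_eq_nil (by omega)]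
      simp [PySem.Set.add_of_mem h]
  | succ k ih =>
      have h1 : ((k+1 : Nat) : Int) + 1 = ((k:Int)+1) + 1 := by push_cast; ring
      rw [h1, PySem.List.pyRange_one_succ_right (a := 1) (by omega),
          PySem.List.pyRange_one_succ_right (a := 0) (by omega)]
      simp only [List.foldl_append, List.foldl_cons, List.foldl_nil]
      rw [ih]
      exact stepA_binRow k _ (mem_foldl_stepB s 1 h) _

-- ===== VERDICT (by name: the statement is the Claim_ definition above) =====
theorem distinct_num_in_pascal_triangle_spec : Claim_equal_distinct_num_in_pascal_triangle := by
  intro n _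
  show distinct_num_in_pascal_triangle n = distinct_num_in_pascal_triangle_alt n
  unfold distinct_num_in_pascal_triangle distinct_num_in_pascal_triangle_alt
  have hmem : (1:Int) ∈ PySem.Set.add PySem.Set.empty 1 := by decide
  by_cases hn : n ≤ 0
  · rw [PySem.List.pyRange_one_eq_nil (by omega), PySem.List.pyRange_one_eq_nil hn]
    rfl
  · have hk : n = ((n.toNat - 1 : Nat) : Int) + 1 := by omega
    rw [show ([1] : List Int) = binRow 0 from binRow_zero.symm, hk,
        core (n.toNat - 1) _ hmem]
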